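-- pv_equiv track=rewrite | github.com/zdeag/Rialto-Capital-Demo | refine/clean_exhibits.py | clean_table
-- ===== SOURCE A (Python) =====
-- def clean_table(table: list[list[str]]) -> list[list[str]]:
--     # Remove all-empty rows
--     cleaned = [row for row in table if any(cell.strip() for cell in row)]
--     if not cleaned:
--         return []
--
--     # Normalize row lengths
--     max_cols = max(len(r) for r in cleaned)
--     for r in cleaned:
--         while len(r) < max_cols:
--             r.append("")
--
--     # Remove columns that are entirely empty
--     cols_to_keep = []
--     for c in range(max_cols):
--         if any(row[c].strip() for row in cleaned if c < len(row)):
--             cols_to_keep.append(c)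
--
--     result = []
--     for row in cleaned:
--         result.append([row[c] for c in cols_to_keep if c < len(row)])
--
--     return result
-- ===== SOURCE B (Python) =====
-- def clean_table(table: list[list[str]]) -> list[list[str]]:
--     cleaned = [row for row in table if any(cell.strip() for cell in row)]
--     if not cleaned:
--         return []
--
--     # Normalize row lengths (in-place, same mutation as A)
--     max_cols = max(len(r) for r in cleaned)
--     for r in cleaned:
--         while len(r) < max_cols:
--             r.append("")
--
--     # Transpose, drop all-empty columns, transpose back
--     cols = [col for col in zip(*cleaned) if any(c.strip() for c in col)]
--     return [list(row) for row in zip(*cols)]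
-- ===== Notes on version B (the rewrite author's own statement) =====
-- stated objective: idiomatic
-- what changed: B keeps the row filter and the in-place padding but replaces A's column-index loop plus per-row index comprehension with a transpose: filter the all-empty columns out of zip(*cleaned) and transpose back.
import Mathlib
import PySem

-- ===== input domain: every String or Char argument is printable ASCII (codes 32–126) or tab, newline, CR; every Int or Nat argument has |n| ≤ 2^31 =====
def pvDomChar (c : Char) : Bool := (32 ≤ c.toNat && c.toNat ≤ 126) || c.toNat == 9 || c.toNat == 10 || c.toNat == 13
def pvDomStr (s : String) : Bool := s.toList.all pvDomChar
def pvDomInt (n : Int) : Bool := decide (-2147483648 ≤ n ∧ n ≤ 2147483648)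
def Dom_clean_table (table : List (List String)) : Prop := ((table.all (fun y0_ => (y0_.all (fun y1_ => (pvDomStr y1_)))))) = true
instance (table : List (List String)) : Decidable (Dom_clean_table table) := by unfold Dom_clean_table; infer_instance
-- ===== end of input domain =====

-- B replaces A's column-index scan with a transpose / filter / transpose-back; return value only —
-- both Pythons also pad the caller's row lists in place identically (same mutation in A and B).

-- shared helpers (identical Python lines in A and B: the row filter and the in-place padding loop)
def cellTruthy (s : String) : Bool := PySem.Str.strip s != ""
def rowNonempty (row : List String) : Bool := row.any cellTruthy
-- the `while len(r) < max_cols: r.append("")` loop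
def padRow (r : List String) (m : Nat) : List String :=
  if r.length < m then padRow (r ++ [""]) m else r
termination_by m - r.length
decreasing_by simp; omega

-- ===== PORT A =====
def clean_table (table : List (List String)) : List (List String) :=
  let cleaned := table.filter rowNonempty
  if cleaned = [] then [] else
  let max_cols := (cleaned.map List.length).foldl max 0
  let cleaned := cleaned.map (fun r => padRow r max_cols)
  let cols_to_keep := (List.range max_cols).foldl (fun acc c =>
    if cleaned.any (fun row => decide (c < row.length) && cellTruthy (row.getD c "")) then
      acc ++ [c] else acc) []
  cleaned.map (fun row => (cols_to_keep.filter (fun c => decide (c < row.length))).map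
    (fun c => row.getD c ""))

-- ===== PORT B =====
-- zip(*rows): Python zip truncates at the shortest row
def zipStar (rows : List (List String)) : List (List String) :=
  if _h : rows ≠ [] ∧ rows.all (fun r => !r.isEmpty) then
    (rows.map (fun r => r.headD "")) :: zipStar (rows.map List.tail)
  else []
termination_by (rows.headD []).length
decreasing_by
  obtain ⟨h1, h2⟩ := _h
  cases rows with
  | nil => exact absurd rfl h1
  | cons a t =>
    have ha : a ≠ [] := by
      have := (List.all_eq_true.mp h2) a (List.mem_cons_self ..)
      simpa using this
    cases a with
      | nil => exact absurd rfl ha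
      | cons b bs => simp

def clean_table_alt (table : List (List String)) : List (List String) :=
  let cleaned := table.filter rowNonempty
  if cleaned = [] then [] else
  let max_cols := (cleaned.map List.length).foldl max 0
  let cleaned := cleaned.map (fun r => padRow r max_cols)
  let cols := (zipStar cleaned).filter (fun col => col.any cellTruthy)
  (zipStar cols).map (fun r => r)

-- ===== PRECONDITION & SPEC =====
def Spec_clean_table (table : List (List String)) (out : List (List String)) : Prop := out = clean_table_alt table
instance (table : List (List String)) (out : List (List String)) : Decidable (Spec_clean_table table out) := by unfold Spec_clean_table; infer_instance

-- ===== CLAIM (what is proved, stated in full; the proofs are below) =====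
def Claim_equal_clean_table : Prop := ∀ (table : List (List String)), Dom_clean_table table → Spec_clean_table table (clean_table table)

-- ===== LEMMAS AND PROOFS =====

theorem padRow_eq (r : List String) (m : Nat) :
    padRow r m = r ++ List.replicate (m - r.length) "" := by
  unfold padRow
  split
  · next h =>
    rw [padRow_eq (r ++ [""]) m]
    have : m - r.length = (m - (r.length + 1)) + 1 := by omega
    rw [this, List.replicate_succ]
    simp
  · next h =>
    have : m - r.length = 0 := by omega
    simp [this]
termination_by m - r.length
decreasing_by simp; omega

theorem padRow_length (r : List String) (m : Nat) (h : r.length ≤ m) :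
    (padRow r m).length = m := by
  rw [padRow_eq]; simp; omega

theorem getD_map' {α β : Type} (f : α → β) (l : List α) (i : Nat) (d : β) (x : α)
    (h : i < l.length) : (l.map f).getD i d = f (l.getD i x) := by
  rw [List.getD_eq_getElem l x h, List.getD_eq_getElem _ d (by simpa using h)]
  simp

theorem map_eq_range_map {α β : Type} (f : α → β) (l : List α) (x : α) :
    l.map f = (List.range l.length).map (fun i => f (l.getD i x)) := by
  induction l with
  | nil => simp
  | cons a t ih =>
    simp only [List.map_cons, List.length_cons, List.range_succ_eq_map, List.map_map]
    refine congrArg₂ (· :: ·) (by simp) ?_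
    rw [ih]
    apply List.map_congr_left
    intro i _
    simp

-- zipStar on a rectangular, nonempty list of rows is the transpose
theorem zipStar_rect (m : Nat) (rows : List (List String)) (h0 : rows ≠ [])
    (hrect : ∀ r ∈ rows, r.length = m) :
    zipStar rows = (List.range m).map (fun c => rows.map (fun r => r.getD c "")) := by
  induction m generalizing rows with
  | zero =>
    have : ¬ (rows ≠ [] ∧ rows.all (fun r => !r.isEmpty) = true) := by
      intro ⟨h1, h2⟩
      have hh := (List.all_eq_true.mp h2) (rows.headD []) (by
        cases rows with
        | nil => exact absurd rfl h1
        | cons a t => simp)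
      have := hrect (rows.headD []) (by
        cases rows with
        | nil => exact absurd rfl h1
        | cons a t => simp)
      simp at hh
      exact hh (List.eq_nil_of_length_eq_zero (by simpa using this))
    rw [zipStar, dif_neg this]
    simp
  | succ m ih =>
    have hall : rows.all (fun r => !r.isEmpty) = true := by
      apply List.all_eq_true.mpr
      intro r hr
      have := hrect r hr
      simp
      intro he; rw [he] at this; simp at this
    rw [zipStar, dif_pos ⟨h0, hall⟩]
    have htrect : ∀ r ∈ rows.map List.tail, r.length = m := by
      intro r hr
      obtain ⟨s, hs, rfl⟩ := List.mem_map.mp hr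
      have := hrect s hs
      simp [this]
    rw [ih (rows.map List.tail) (by simpa using h0) htrect]
    rw [List.range_succ_eq_map]
    simp only [List.map_cons, List.map_map]
    congr 1
    · apply List.map_congr_left
      intro r hr
      have := hrect r hr
      cases r with
      | nil => simp at this
      | cons a t => simp
    · apply List.map_congr_left
      intro c _
      apply List.map_congr_left
      intro r hr
      have := hrect r hr
      cases r with
      | nil => simp at this
      | cons a t => simp

theorem clean_table_spec : Claim_equal_clean_table := by
  unfold Claim_equal_clean_table Spec_clean_table
  intro table _
  unfold clean_table clean_table_alt
  simp only
  set cleaned0 := table.filter rowNonempty with hc0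
  by_cases hnil : cleaned0 = []
  · simp [hnil]
  · rw [if_neg hnil, if_neg hnil]
    set m := (cleaned0.map List.length).foldl max 0 with hm
    set rows := cleaned0.map (fun r => padRow r m) with hrows
    have hrect : ∀ r ∈ rows, r.length = m := by
      intro r hr
      obtain ⟨s, hs, rfl⟩ := List.mem_map.mp hr
      exact padRow_length s m ((PySem.List.le_foldl_max _ 0).2 s.length
        (List.mem_map_of_mem hs))
    have hrs0 : rows ≠ [] := by simpa [hrows] using hnil
    have hn : rows.length = cleaned0.length := by simp [hrows]
    set pred : Nat → Bool := fun c => rows.any (fun row => cellTruthy (row.getD c "")) with hpred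
    set K := (List.range m).filter pred with hK
    -- A's cols_to_keep loop is the filter K
    have hA : (List.range m).foldl (fun acc c =>
        if rows.any (fun row => decide (c < row.length) && cellTruthy (row.getD c "")) = true then
          acc ++ [c] else acc) [] = K := by
      have := PySem.List.foldl_append_if
        (fun c => rows.any (fun row => decide (c < row.length) && cellTruthy (row.getD c "")))
        (id : Nat → Nat) (List.range m) []
      simp only [id] at this
      rw [this]
      simp only [List.map_id, List.nil_append, hK]
      apply List.filter_congr
      intro c hc
      apply PySem.List.any_congr_mem
      intro row hrow
      rw [hrect row hrow]
      simp [List.mem_range.mp hc]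
    rw [hA]
    -- A's per-row inner filter is trivial
    have hAres : rows.map (fun row =>
        (K.filter (fun c => decide (c < row.length))).map (fun c => row.getD c "")) =
        rows.map (fun row => K.map (fun c => row.getD c "")) := by
      apply List.map_congr_left
      intro row hrow
      congr 1
      apply List.filter_eq_self.mpr
      intro c hcK
      have : c < m := List.mem_range.mp (List.mem_of_mem_filter hcK)
      rw [hrect row hrow]
      simpa using this
    rw [hAres]
    -- B side
    rw [zipStar_rect m rows hrs0 hrect]
    set colFn : Nat → List String := fun c => rows.map (fun r => r.getD c "") with hcol
    have hBcols : ((List.range m).map colFn).filter (fun col => col.any cellTruthy) =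
        K.map colFn := by
      rw [List.filter_map, hK]
      congr 1
      apply List.filter_congr
      intro c _
      simp only [hcol, hpred, List.any_map, Function.comp_def]
    rw [hBcols]
    -- K is nonempty: the first row has a truthy cell
    have hKne : K ≠ [] := by
      have hhd : rows.headD [] ∈ rows := by
        obtain ⟨a, t, he⟩ := List.exists_cons_of_ne_nil hrs0
        rw [he]; simp
      have hne : rowNonempty (rows.headD []) = true := by
        obtain ⟨s, hs, hpad⟩ := List.mem_map.mp hhd
        rw [← hpad, padRow_eq]
        have := List.of_mem_filter hs
        unfold rowNonempty at this ⊢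
        simp [List.any_append]
        left
        simpa using this
      obtain ⟨x, hx, hxt⟩ := List.any_eq_true.mp hne
      obtain ⟨i, hi, rfl⟩ := List.mem_iff_getElem.mp hx
      have him : i < m := by rw [← hrect _ hhd]; exact hi
      have hpi : pred i = true := by
        rw [hpred]
        apply List.any_eq_true.mpr
        exact ⟨rows.headD [], hhd, by rw [List.getD_eq_getElem _ _ hi]; exact hxt⟩
      exact List.ne_nil_of_mem (List.mem_filter.mpr ⟨List.mem_range.mpr him, hpi⟩)
    -- cols are rectangular of height rows.length
    have hcrect : ∀ col ∈ K.map colFn, col.length = rows.length := by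
      intro col hcolm
      obtain ⟨c, _, rfl⟩ := List.mem_map.mp hcolm
      simp [hcol]
    rw [zipStar_rect rows.length (K.map colFn) (by simpa using hKne) hcrect]
    simp only [List.map_id']
    rw [map_eq_range_map (fun row => K.map (fun c => row.getD c "")) rows []]
    apply List.map_congr_left
    intro i hi
    rw [List.map_map]
    apply List.map_congr_left
    intro c _
    simp only [Function.comp_apply, hcol]
    exact (getD_map' (fun r => r.getD c "") rows i "" [] (List.mem_range.mp hi)).symm
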